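-- pv_equiv track=rewrite | github.com/lf-data/finance_bot | screener.py | _benchmark_for_ticker
-- ===== SOURCE A (Python) =====
-- _SUFFIX_BENCHMARK: dict[str, str] = {
--     # Italia
--     ".MI":  "FTSEMIB.MI",
--     # Germania
--     ".DE":  "^GDAXI",
--     ".F":   "^GDAXI",
--     ".BE":  "^GDAXI",
--     # Francia
--     ".PA":  "^FCHI",
--     # Spagna
--     ".MC":  "^IBEX",
--     # UK
--     ".L":   "^FTSE",
--     # Svizzera
--     ".SW":  "^SSMI",
--     # Paesi Bassi
--     ".AS":  "^AEX",
--     # Portogallo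
--     ".LS":  "^PSI20",
--     # Giappone
--     ".T":   "^N225",
--     # Hong Kong
--     ".HK":  "^HSI",
--     # Canada
--     ".TO":  "^GSPTSE",
--     ".V":   "^GSPTSE",
--     # Australia
--     ".AX":  "^AXJO",
--     # Brasile
--     ".SA":  "^BVSP",
-- }
--
-- _US_BENCHMARK = "SPY"   # nessun suffisso → mercato USA
--
-- def _benchmark_for_ticker(ticker: str, override: str | None = None) -> str:
--     """Restituisce il benchmark appropriato per il ticker in base al suffisso."""
--     if override:
--         return override
--     upper = ticker.upper()
--     for suffix, bench in _SUFFIX_BENCHMARK.items():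
--         if upper.endswith(suffix.upper()):
--             return bench
--     return _US_BENCHMARK
-- ===== SOURCE B (Python) =====
-- _SUFFIX_BENCHMARK: dict[str, str] = {
--     ".MI":  "FTSEMIB.MI",
--     ".DE":  "^GDAXI",
--     ".F":   "^GDAXI",
--     ".BE":  "^GDAXI",
--     ".PA":  "^FCHI",
--     ".MC":  "^IBEX",
--     ".L":   "^FTSE",
--     ".SW":  "^SSMI",
--     ".AS":  "^AEX",
--     ".LS":  "^PSI20",
--     ".T":   "^N225",
--     ".HK":  "^HSI",
--     ".TO":  "^GSPTSE",
--     ".V":   "^GSPTSE",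
--     ".AX":  "^AXJO",
--     ".SA":  "^BVSP",
-- }
--
-- _US_BENCHMARK = "SPY"
--
--
-- def _benchmark_for_ticker(ticker: str, override: str | None = None) -> str:
--     """Benchmark per il ticker: one O(1) keyed lookup on the final '.XX' segment."""
--     if override:
--         return override
--     upper = ticker.upper()
--     if '.' not in upper:
--         return _US_BENCHMARK
--     key = '.' + upper.rsplit('.', 1)[1]
--     return _SUFFIX_BENCHMARK.get(key, _US_BENCHMARK)
-- ===== Notes on version B (the rewrite author's own statement) =====
-- stated objective: simpler
-- what changed: Replaces the linear endswith-scan over the suffix dict with a single keyed dict lookup: uppercase the ticker, reconstruct '.'+last-dot-segment as the key, and get it with default SPY.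
import Mathlib
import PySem

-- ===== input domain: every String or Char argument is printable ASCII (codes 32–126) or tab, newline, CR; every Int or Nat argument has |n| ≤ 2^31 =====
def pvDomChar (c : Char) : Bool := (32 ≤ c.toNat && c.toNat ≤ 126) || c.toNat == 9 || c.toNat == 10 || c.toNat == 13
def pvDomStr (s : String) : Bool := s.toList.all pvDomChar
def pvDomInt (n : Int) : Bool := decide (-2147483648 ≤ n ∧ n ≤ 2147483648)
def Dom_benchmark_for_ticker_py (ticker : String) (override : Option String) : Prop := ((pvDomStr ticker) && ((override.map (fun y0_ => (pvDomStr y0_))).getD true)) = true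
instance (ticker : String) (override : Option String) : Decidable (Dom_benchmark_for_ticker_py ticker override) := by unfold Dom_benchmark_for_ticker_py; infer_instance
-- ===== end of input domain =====

-- B replaces A's linear endswith-scan over the suffix dict by one keyed lookup of '.'+last-dot-segment (objective: simpler).

def SUFFIX_BENCHMARK : PySem.Dict String String := PySem.Dict.ofList
  [(".MI", "FTSEMIB.MI"), (".DE", "^GDAXI"), (".F", "^GDAXI"), (".BE", "^GDAXI"),
   (".PA", "^FCHI"), (".MC", "^IBEX"), (".L", "^FTSE"), (".SW", "^SSMI"),
   (".AS", "^AEX"), (".LS", "^PSI20"), (".T", "^N225"), (".HK", "^HSI"),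
   (".TO", "^GSPTSE"), (".V", "^GSPTSE"), (".AX", "^AXJO"), (".SA", "^BVSP")]

def US_BENCHMARK : String := "SPY"

-- ===== PORT A =====
-- the for-loop with early return: first (suffix, bench) with upper.endswith(suffix.upper())
def benchLoop : List (String × String) → String → String
  | [], _ => US_BENCHMARK
  | (suffix, bench) :: rest, upper =>
      if PySem.Str.endswith upper (PySem.Str.upper suffix) then bench else benchLoop rest upper

def benchmark_for_ticker_py (ticker : String) (override : Option String) : String :=
  -- 'if override:' — truthy iff override is some nonempty string
  if override.getD "" ≠ "" then override.getD ""
  else benchLoop SUFFIX_BENCHMARK.items (PySem.Str.upper ticker)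

-- ===== PORT B =====
-- hand port of upper.rsplit('.', 1)[1]: the segment after the last '.' (exact when '.' occurs in upper)
def lastSegment (upper : String) : String :=
  String.ofList ((upper.toList.reverse.takeWhile (· != '.')).reverse)

def benchmark_for_ticker_py_alt (ticker : String) (override : Option String) : String :=
  if override.getD "" ≠ "" then override.getD ""
  else
    let upper := PySem.Str.upper ticker
    if PySem.Str.isIn "." upper = false then US_BENCHMARK
    else SUFFIX_BENCHMARK.getD ("." ++ lastSegment upper) US_BENCHMARK

-- ===== PRECONDITION & SPEC =====
def Spec_benchmark_for_ticker_py (ticker : String) (override : Option String) (out : String) : Prop := out = benchmark_for_ticker_py_alt ticker override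
instance (ticker : String) (override : Option String) (out : String) : Decidable (Spec_benchmark_for_ticker_py ticker override out) := by unfold Spec_benchmark_for_ticker_py; infer_instance

-- ===== CLAIM (what is proved, stated in full; the proofs are below) =====
def Claim_equal_benchmark_for_ticker_py : Prop := ∀ (ticker : String) (override : Option String), Dom_benchmark_for_ticker_py ticker override → Spec_benchmark_for_ticker_py ticker override (benchmark_for_ticker_py ticker override)

-- ===== LEMMAS AND PROOFS =====

-- first-match association lookup with default, the contract of dict.get on a literal dict
def lookupAssoc : List (String × String) → String → String
  | [], _ => US_BENCHMARK
  | (k, v) :: rest, key => if key = k then v else lookupAssoc rest key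

theorem takeWhile_append_dot (a b : List Char) (h : '.' ∉ a) :
    (a ++ '.' :: b).takeWhile (· != '.') = a := by
  induction a with
  | nil => simp
  | cons c t ih =>
      simp only [List.mem_cons, not_or] at h
      simp [bne_iff_ne, Ne.symm h.1, ih h.2]

theorem dropWhile_dot (l : List Char) (h : '.' ∈ l) :
    ∃ t, l.dropWhile (· != '.') = '.' :: t := by
  induction l with
  | nil => simp at h
  | cons c t ih =>
      by_cases hc : c = '.'
      · subst hc; exact ⟨t, by simp⟩
      · have : '.' ∈ t := by simpa [hc, eq_comm] using h
        simpa [List.dropWhile_cons, hc] using ih this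

theorem endswith_dot_key (u r : List Char) (hr : '.' ∉ r) :
    PySem.Chars.endswith u ('.' :: r) = true ↔
      ('.' ∈ u ∧ u.reverse.takeWhile (· != '.') = r.reverse) := by
  rw [PySem.Chars.endswith_iff]
  constructor
  · rintro ⟨t, rfl⟩
    constructor
    · simp
    · have : (t ++ '.' :: r).reverse = r.reverse ++ '.' :: t.reverse := by simp
      rw [this, takeWhile_append_dot _ _ (by simpa using hr)]
  · rintro ⟨hu, htw⟩
    have hmem : '.' ∈ u.reverse := by simpa using hu
    obtain ⟨t, hdw⟩ := dropWhile_dot u.reverse hmem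
    have hsplit : u.reverse = r.reverse ++ '.' :: t := by
      conv_lhs => rw [← List.takeWhile_append_dropWhile (p := (· != '.')) (l := u.reverse)]
      rw [htw, hdw]
    refine ⟨t.reverse, ?_⟩
    have := congrArg List.reverse hsplit
    simpa using this.symm

theorem benchLoop_eq_lookup (s : String)
    (l : List (String × String))
    (hl : ∀ p ∈ l, PySem.Str.upper p.1 = p.1 ∧ p.1.toList.head? = some '.' ∧ '.' ∉ p.1.toList.tail) :
    benchLoop l s =
      if '.' ∈ s.toList then
        lookupAssoc l (String.ofList ('.' :: (s.toList.reverse.takeWhile (· != '.')).reverse))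
      else US_BENCHMARK := by
  induction l with
  | nil => simp [benchLoop, lookupAssoc]
  | cons p rest ih =>
      obtain ⟨k, v⟩ := p
      obtain ⟨hup, hhead, htail⟩ := hl (k, v) (List.mem_cons_self ..)
      have hrest := fun p hp => hl p (List.mem_cons_of_mem _ hp)
      -- k.toList = '.' :: r with '.' ∉ r
      obtain ⟨r, hk, hr⟩ : ∃ r, k.toList = '.' :: r ∧ '.' ∉ r := by
        cases hlist : k.toList with
        | nil => rw [hlist] at hhead; simp at hhead
        | cons c t =>
            rw [hlist] at hhead htail
            simp only [List.head?_cons, Option.some.injEq] at hhead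
            exact ⟨t, by rw [hhead], by simpa using htail⟩
      simp only [benchLoop, hup]
      have hends : PySem.Str.endswith s k = PySem.Chars.endswith s.toList ('.' :: r) := by
        simp [PySem.Str.endswith_eq, hk]
      by_cases hdot : '.' ∈ s.toList
      · simp only [if_pos hdot] at ih ⊢
        by_cases hmatch : s.toList.reverse.takeWhile (· != '.') = r.reverse
        · have htrue : PySem.Str.endswith s k = true := by
            rw [hends, endswith_dot_key _ r hr]; exact ⟨hdot, hmatch⟩
          have hkey : String.ofList ('.' :: (s.toList.reverse.takeWhile (· != '.')).reverse) = k := by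
            apply String.toList_inj.mp
            simp [hmatch, hk]
          rw [htrue, if_pos rfl, lookupAssoc, if_pos hkey]
        · have hfalse : PySem.Str.endswith s k = false := by
            rw [hends, Bool.eq_false_iff]
            intro hcon
            exact hmatch ((endswith_dot_key _ r hr).mp hcon).2
          have hne : String.ofList ('.' :: (s.toList.reverse.takeWhile (· != '.')).reverse) ≠ k := by
            intro hcon
            apply hmatch
            have := congrArg String.toList hcon
            rw [hk] at this
            simp only [String.toList_ofList, List.cons.injEq] at this
            simpa using congrArg List.reverse this.2
          rw [hfalse, if_neg (by simp), lookupAssoc, if_neg hne, ih hrest]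
      · have hfalse : PySem.Str.endswith s k = false := by
          rw [hends, Bool.eq_false_iff]
          intro hcon
          rw [endswith_dot_key _ r hr] at hcon
          exact hdot hcon.1
        simp only [if_neg hdot] at ih ⊢
        rw [hfalse, if_neg (by simp), ih hrest]

theorem lookupAssoc_eq_getD (l : List (String × String)) (key : String) :
    lookupAssoc l key = (PySem.Dict.mk l).getD key US_BENCHMARK := by
  induction l with
  | nil => simp [lookupAssoc, PySem.Dict.getD_eq_get?_getD, PySem.Dict.get?]
  | cons p rest ih =>
      obtain ⟨k, v⟩ := p
      rw [lookupAssoc, PySem.Dict.getD_eq_get?_getD, PySem.Dict.get?_mk_cons]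
      by_cases h : key = k
      · simp [h]
      · simp [h, Ne.symm h, ih, PySem.Dict.getD_eq_get?_getD]

theorem suffix_shape : ∀ p ∈ SUFFIX_BENCHMARK.items,
    PySem.Str.upper p.1 = p.1 ∧ p.1.toList.head? = some '.' ∧ '.' ∉ p.1.toList.tail := by
  decide

theorem isIn_dot (s : String) : PySem.Str.isIn "." s = true ↔ '.' ∈ s.toList := by
  rw [PySem.Str.isIn_iff_infix]
  constructor
  · intro h; exact h.mem (by decide)
  · intro h
    obtain ⟨a, b, hab⟩ := List.append_of_mem h
    exact ⟨a, b, by simp [hab]⟩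

-- ===== VERDICT (by name: the statement is the Claim_ definition above) =====
theorem benchmark_for_ticker_py_spec : Claim_equal_benchmark_for_ticker_py := by
  intro ticker override _
  unfold Spec_benchmark_for_ticker_py benchmark_for_ticker_py benchmark_for_ticker_py_alt
  by_cases hov : override.getD "" ≠ ""
  · simp [hov]
  · simp only [if_neg hov]
    set U := PySem.Str.upper ticker with hU
    rw [benchLoop_eq_lookup U SUFFIX_BENCHMARK.items suffix_shape]
    by_cases hdot : '.' ∈ U.toList
    · rw [if_pos hdot, if_neg (by rw [(isIn_dot U).mpr hdot]; simp)]
      rw [lookupAssoc_eq_getD]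
      have hdict : ∀ d : PySem.Dict String String, PySem.Dict.mk d.items = d := fun _ => rfl
      rw [hdict]
      have hkey : ("." ++ lastSegment U)
          = String.ofList ('.' :: (U.toList.reverse.takeWhile (· != '.')).reverse) := by
        apply String.toList_inj.mp
        simp [lastSegment]
      rw [hkey]
    · rw [if_neg hdot, if_pos (by rw [Bool.eq_false_iff]; exact fun hcon => hdot ((isIn_dot U).mp hcon))]
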